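-- pv_equiv track=rewrite | github.com/IlyasDevelopment/Yandex-Algorithm-Training | Lections/count_beating_rooks.py | count_beating_rooks
-- ===== SOURCE A (Python) =====
-- def count_beating_rooks(rook_coords):
--     def add_rook(row_or_col, key):
--         if key not in row_or_col:
--             row_or_col[key] = 0
--         row_or_col[key] += 1
--
--     def count_pairs(row_or_col):
--         pairs = 0
--         for key in row_or_col:
--             pairs += row_or_col[key] - 1
--         return pairs
--
--     rooks_in_row = {}
--     rooks_in_col = {}
--     for row, col in rook_coords:
--         add_rook(rooks_in_row, row)
--         add_rook(rooks_in_col, col)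
--     return count_pairs(rooks_in_row) + count_pairs(rooks_in_col)
-- ===== SOURCE B (Python) =====
-- def count_beating_rooks(rook_coords):
--     rows = set()
--     cols = set()
--     n = 0
--     for row, col in rook_coords:
--         rows.add(row)
--         cols.add(col)
--         n += 1
--     return 2 * n - len(rows) - len(cols)
-- ===== Notes on version B (the rewrite author's own statement) =====
-- stated objective: simpler
-- what changed: Replaces the two counting dicts and the second loop over their keys by one pass maintaining sets of distinct rows/cols and a rook count, returning the closed form 2*n - |rows| - |cols| (sum of (count-1) over groups = total minus number of distinct groups).
import Mathlib
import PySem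

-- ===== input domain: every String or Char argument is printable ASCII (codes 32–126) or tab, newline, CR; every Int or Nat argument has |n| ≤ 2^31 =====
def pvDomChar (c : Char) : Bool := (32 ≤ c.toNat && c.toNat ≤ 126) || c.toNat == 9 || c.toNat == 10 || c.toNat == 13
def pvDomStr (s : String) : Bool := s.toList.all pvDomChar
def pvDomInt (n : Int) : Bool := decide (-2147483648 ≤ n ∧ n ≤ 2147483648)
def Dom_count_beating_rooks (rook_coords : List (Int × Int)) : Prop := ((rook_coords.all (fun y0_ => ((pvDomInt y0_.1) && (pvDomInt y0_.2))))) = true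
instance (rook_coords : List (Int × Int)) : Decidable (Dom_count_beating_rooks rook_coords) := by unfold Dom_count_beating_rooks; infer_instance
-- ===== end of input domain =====

-- B replaces A's two counting dicts plus a second loop over their keys by one pass
-- maintaining distinct-row/col sets and a count, returning 2*n - |rows| - |cols| (simpler).

-- ===== PORT A =====
def pvAddRook (d : PySem.Dict Int Int) (key : Int) : PySem.Dict Int Int :=
  let d := if d.contains key then d else d.insert key 0
  d.insert key (d.getD key 0 + 1)

def pvCountPairs (d : PySem.Dict Int Int) : Int :=
  d.keys.foldl (fun pairs key => pairs + (d.getD key 0 - 1)) 0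

def count_beating_rooks (rook_coords : List (Int × Int)) : Int :=
  let st := rook_coords.foldl
    (fun (s : PySem.Dict Int Int × PySem.Dict Int Int) rc =>
      (pvAddRook s.1 rc.1, pvAddRook s.2 rc.2))
    (PySem.Dict.empty, PySem.Dict.empty)
  pvCountPairs st.1 + pvCountPairs st.2

-- ===== PORT B =====
def count_beating_rooks_alt (rook_coords : List (Int × Int)) : Int :=
  let st := rook_coords.foldl
    (fun (s : PySem.Set Int × PySem.Set Int × Int) rc =>
      (PySem.Set.add s.1 rc.1, PySem.Set.add s.2.1 rc.2, s.2.2 + 1))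
    (PySem.Set.empty, PySem.Set.empty, 0)
  2 * st.2.2 - PySem.Set.len st.1 - PySem.Set.len st.2.1

-- ===== PRECONDITION & SPEC =====
def Spec_count_beating_rooks (rook_coords : List (Int × Int)) (out : Int) : Prop := out = count_beating_rooks_alt rook_coords
instance (rook_coords : List (Int × Int)) (out : Int) : Decidable (Spec_count_beating_rooks rook_coords out) := by unfold Spec_count_beating_rooks; infer_instance

-- ===== CLAIM (what is proved, stated in full; the proofs are below) =====
def Claim_equal_count_beating_rooks : Prop := ∀ (rook_coords : List (Int × Int)), Dom_count_beating_rooks rook_coords → Spec_count_beating_rooks rook_coords (count_beating_rooks rook_coords)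

-- ===== LEMMAS AND PROOFS =====

-- Re-inserting the same key overwrites the first insertion.
theorem pv_insert_insert_same (d : PySem.Dict Int Int) (k v w : Int) :
    (d.insert k v).insert k w = d.insert k w := by
  apply PySem.Dict.ext
  by_cases h : d.contains k
  · rw [PySem.Dict.items_insert_of_contains _ w (PySem.Dict.contains_insert_self d k v),
        PySem.Dict.items_insert_of_contains _ v h,
        PySem.Dict.items_insert_of_contains _ w h, List.map_map]
    apply List.map_congr_left
    intro p _
    by_cases hpk : p.1 = k <;> simp [Function.comp, hpk]
  · simp only [Bool.not_eq_true] at h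
    rw [PySem.Dict.items_insert_of_contains _ w (PySem.Dict.contains_insert_self d k v),
        PySem.Dict.items_insert_of_not_contains _ v h,
        PySem.Dict.items_insert_of_not_contains _ w h, List.map_append]
    have hmap : d.items.map
        (fun p => if p.1 = k then ((k, w) : Int × Int) else p) = d.items := by
      have hid : ∀ p ∈ d.items,
          (if p.1 = k then ((k, w) : Int × Int) else p) = id p := by
        intro p hp
        have hkeys : p.1 ∈ d.keys := by
          simp only [PySem.Dict.keys]
          exact List.mem_map_of_mem hp
        have hne : p.1 ≠ k := by
          intro hpk
          have hc : d.contains k = true :=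
            (PySem.Dict.contains_iff_mem_keys d k).mpr (hpk ▸ hkeys)
          rw [hc] at h
          cases h
        simp [hne]
      rw [List.map_congr_left hid, List.map_id]
    simp [hmap]

-- A's add_rook collapses to a single overwrite insert.
theorem pvAddRook_eq (d : PySem.Dict Int Int) (k : Int) :
    pvAddRook d k = d.insert k (d.getD k 0 + 1) := by
  unfold pvAddRook
  by_cases h : d.contains k
  · simp [h]
  · simp only [Bool.not_eq_true] at h
    simp only [h, Bool.false_eq_true, if_false]
    rw [PySem.Dict.getD_insert_self, PySem.Dict.getD_of_not_contains d 0 h,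
      pv_insert_insert_same]

-- A's paired fold splits into two Counters.
theorem countA_pair (xs : List (Int × Int)) :
    xs.foldl
      (fun (s : PySem.Dict Int Int × PySem.Dict Int Int) rc =>
        (pvAddRook s.1 rc.1, pvAddRook s.2 rc.2))
      (PySem.Dict.empty, PySem.Dict.empty)
    = (PySem.Dict.counter (xs.map Prod.fst), PySem.Dict.counter (xs.map Prod.snd)) := by
  simp only [pvAddRook_eq]
  rw [PySem.List.foldl_prod_mk
      (f := fun (d : PySem.Dict Int Int) (rc : Int × Int) => d.insert rc.1 (d.getD rc.1 0 + 1))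
      (g := fun (d : PySem.Dict Int Int) (rc : Int × Int) => d.insert rc.2 (d.getD rc.2 0 + 1))]
  rw [← PySem.Dict.foldl_insert_getD_add_one_eq_counter, List.foldl_map]
  rw [← PySem.Dict.foldl_insert_getD_add_one_eq_counter, List.foldl_map]

-- Sum of multiplicities over the distinct elements is the length.
theorem pv_sum_counts (xs : List Int) :
    ∑ a ∈ xs.toFinset, (xs.count a : Int) = (xs.length : Int) := by
  exact_mod_cast congrArg (fun n : Nat => (n : Int)) (List.sum_toFinset_count_eq_length xs)

-- count_pairs on a Counter is total count minus number of distinct keys.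
theorem pvCountPairs_counter (xs : List Int) :
    pvCountPairs (PySem.Dict.counter xs)
      = (xs.length : Int) - ((PySem.Set.ofList xs).length : Int) := by
  unfold pvCountPairs
  rw [PySem.List.foldl_add (PySem.Dict.counter xs).keys
    (fun key => (PySem.Dict.counter xs).getD key 0 - 1) 0]
  simp only [zero_add, PySem.Dict.keys_counter, PySem.Dict.getD_counter]
  have hnd : (PySem.Set.ofList xs).Nodup := PySem.Set.nodup_ofList xs
  rw [← List.sum_toFinset _ hnd]
  have hfs : (PySem.Set.ofList xs).toFinset = xs.toFinset := by
    ext a; simp [PySem.Set.mem_ofList]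
  have hcard : xs.toFinset.card = (PySem.Set.ofList xs).length := by
    rw [← hfs]; exact List.toFinset_card_of_nodup hnd
  rw [Finset.sum_sub_distrib, hfs, pv_sum_counts]
  simp [hcard]

-- Counting a fold step by step.
theorem pv_foldl_len (xs : List (Int × Int)) (init : Int) :
    xs.foldl (fun n _ => n + 1) init = init + (xs.length : Int) := by
  induction xs generalizing init with
  | nil => simp
  | cons x xs ih => simp [ih]; ring

-- B's triple fold computes both distinct sets and the length.
theorem countB_state (xs : List (Int × Int)) :
    xs.foldl
      (fun (s : PySem.Set Int × PySem.Set Int × Int) rc =>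
        (PySem.Set.add s.1 rc.1, PySem.Set.add s.2.1 rc.2, s.2.2 + 1))
      (PySem.Set.empty, PySem.Set.empty, 0)
    = (PySem.Set.ofList (xs.map Prod.fst), PySem.Set.ofList (xs.map Prod.snd),
       (xs.length : Int)) := by
  rw [PySem.List.foldl_prod_mk
      (f := fun (a : PySem.Set Int) (rc : Int × Int) => PySem.Set.add a rc.1)
      (g := fun (b : PySem.Set Int × Int) (rc : Int × Int) =>
        (PySem.Set.add b.1 rc.2, b.2 + 1))]
  rw [PySem.List.foldl_prod_mk
      (f := fun (a : PySem.Set Int) (rc : Int × Int) => PySem.Set.add a rc.2)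
      (g := fun (n : Int) (_ : Int × Int) => n + 1)]
  rw [PySem.Set.ofList_eq_foldl, PySem.Set.ofList_eq_foldl, List.foldl_map, List.foldl_map,
    pv_foldl_len]
  simp

-- ===== VERDICT (by name: the statement is the Claim_ definition above) =====
theorem count_beating_rooks_spec : Claim_equal_count_beating_rooks := by
  intro xs _
  show _ = _
  rw [count_beating_rooks, count_beating_rooks_alt, countA_pair, countB_state]
  simp only [pvCountPairs_counter, PySem.Set.len, List.length_map]
  ring
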